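-- pv_equiv track=rewrite | github.com/Aelita0319/git-learning | na_number.py | find_narcissistic_number
-- ===== SOURCE A (Python) =====
-- def find_narcissistic_number(start: int, end: int):
--     lst = []
--     for i in range(start, end):
--         exp = len(str(i))
--         tmp = i
--         sums = 0
--         for j in range(exp):
--             sums += (tmp % 10) ** exp
--             tmp //= 10
--         if sums == i:
--             lst.append(i)
--     return lst
-- ===== SOURCE B (Python) =====
-- def _digits(n):
--     # least-significant-first digit list of n (n >= 0)
--     if n < 10:
--         return [n]
--     return [n % 10] + _digits(n // 10)
--
--
-- def find_narcissistic_number(start, end):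
--     res = []
--     for i in range(max(start, 0), end):
--         ds = _digits(i)
--         e = len(ds)
--         if sum(d ** e for d in ds) == i:
--             res.append(i)
--     return res
-- ===== Notes on version B (the rewrite author's own statement) =====
-- stated objective: alternative
-- what changed: B scans only the nonnegative part of the range (negatives can never equal their nonnegative digit-power sum) and tests each candidate by building its digit list once with a recursion and summing powers of its entries, instead of A's str-length-driven fixed-count divmod accumulator loop over the full range.
import Mathlib
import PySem

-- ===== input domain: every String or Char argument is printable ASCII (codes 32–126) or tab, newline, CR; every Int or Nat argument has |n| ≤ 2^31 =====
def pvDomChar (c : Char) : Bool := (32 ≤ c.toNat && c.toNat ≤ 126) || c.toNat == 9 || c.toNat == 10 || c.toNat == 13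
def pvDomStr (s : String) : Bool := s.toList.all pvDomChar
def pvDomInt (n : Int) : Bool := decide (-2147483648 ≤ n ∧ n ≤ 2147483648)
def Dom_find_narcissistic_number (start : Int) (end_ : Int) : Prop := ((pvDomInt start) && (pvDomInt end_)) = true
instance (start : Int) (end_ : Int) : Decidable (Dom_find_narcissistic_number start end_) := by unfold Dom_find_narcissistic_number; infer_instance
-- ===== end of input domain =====

set_option maxHeartbeats 1000000

-- B scans only the nonnegative part of the range and tests each candidate by building its
-- digit list once (recursively) and summing powers of its entries, instead of A's
-- str-length-driven fixed-count divmod accumulator loop over the full range (objective: alternative).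

-- ===== PORT A =====
-- for i in range(start, end): exp = len(str(i)); (tmp, sums) loop; if sums == i: append
def find_narcissistic_number (start : Int) (end_ : Int) : List Int :=
  (PySem.List.pyRange start end_ 1).foldl
    (fun lst i =>
      let exp : Int := PySem.Str.len (PySem.Int.toStr i)
      let st := (PySem.List.pyRange 0 exp 1).foldl
        (fun (st : Int × Int) _ =>
          (PySem.Int.floordiv st.1 10, st.2 + (PySem.Int.mod st.1 10) ^ exp.toNat))
        (i, 0)
      if st.2 == i then lst ++ [i] else lst)
    []

-- ===== PORT B =====
-- _digits(n): least-significant-first digit list of n >= 0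
def pyDigits (n : Int) : List Int :=
  if h : n < 10 then [n]
  else PySem.Int.mod n 10 :: pyDigits (PySem.Int.floordiv n 10)
termination_by n.toNat
decreasing_by
  rw [PySem.Int.floordiv_eq_ediv_of_pos (by norm_num : (0:Int) < 10)]
  omega

def find_narcissistic_number_alt (start : Int) (end_ : Int) : List Int :=
  (PySem.List.pyRange (max start 0) end_ 1).foldl
    (fun res i =>
      let ds := pyDigits i
      let e := ds.length
      if (ds.map (fun d => d ^ e)).sum == i then res ++ [i] else res)
    []

-- ===== PRECONDITION & SPEC =====
def Spec_find_narcissistic_number (start : Int) (end_ : Int) (out : List Int) : Prop := out = find_narcissistic_number_alt start end_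
instance (start : Int) (end_ : Int) (out : List Int) : Decidable (Spec_find_narcissistic_number start end_ out) := by unfold Spec_find_narcissistic_number; infer_instance

-- ===== CLAIM (what is proved, stated in full; the proofs are below) =====
def Claim_equal_find_narcissistic_number : Prop := ∀ (start : Int) (end_ : Int), Dom_find_narcissistic_number start end_ → Spec_find_narcissistic_number start end_ (find_narcissistic_number start end_)

-- ===== LEMMAS AND PROOFS =====

-- A's inner accumulator only ever adds nonnegative powers of nonnegative remainders.
lemma sumsA_nonneg (exp : Int) (l : List Int) :
    ∀ st : Int × Int, 0 ≤ st.2 →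
      0 ≤ (l.foldl (fun (st : Int × Int) _ =>
            (PySem.Int.floordiv st.1 10, st.2 + (PySem.Int.mod st.1 10) ^ exp.toNat)) st).2 := by
  induction l with
  | nil => intro st h; simpa using h
  | cons x xs ih =>
    intro st h
    apply ih
    have hm : 0 ≤ PySem.Int.mod st.1 10 := by
      rw [PySem.Int.mod_eq_emod_of_pos (by norm_num : (0:Int) < 10)]
      exact Int.emod_nonneg _ (by norm_num)
    have : 0 ≤ (PySem.Int.mod st.1 10) ^ exp.toNat := pow_nonneg hm _
    simpa using add_nonneg h this

-- digit-count of Nat.toDigits agrees with pyDigits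
lemma len_toDigits_eq_pyDigits : ∀ m : Nat,
    (Nat.toDigits 10 m).length = (pyDigits (m : Int)).length := by
  intro m
  induction m using Nat.strong_induction_on with
  | _ m ih =>
    by_cases h : m < 10
    · rw [Nat.toDigits_of_lt_base h, pyDigits]
      simp [show (m : Int) < 10 by exact_mod_cast h]
    · push_neg at h
      rw [Nat.toDigits_of_base_le (by norm_num) h, pyDigits]
      have h10 : ¬ ((m : Int) < 10) := by exact_mod_cast not_lt.mpr h
      simp only [h10, dite_false, List.length_cons, List.length_append, List.length_nil]
      have := ih (m / 10) (Nat.div_lt_self (by omega) (by norm_num))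
      rw [show PySem.Int.floordiv (m : Int) 10 = ((m / 10 : Nat) : Int) from
        PySem.Int.floordiv_natCast m 10]
      omega

-- A's inner loop of exactly (pyDigits t).length steps computes the power sum of the digits
lemma innerA (E : Nat) : ∀ t : Int, 0 ≤ t → ∀ s : Int,
    (List.range (pyDigits t).length).foldl
      (fun (st : Int × Int) _ =>
        (PySem.Int.floordiv st.1 10, st.2 + (PySem.Int.mod st.1 10) ^ E)) (t, s)
    = (0, s + (((pyDigits t).map (fun d => d ^ E)).sum)) := by
  intro t
  induction t using pyDigits.induct with
  | case1 n h =>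
    intro hn s
    rw [pyDigits]
    simp only [h, dite_true, List.length_singleton, List.range_one, List.foldl_cons,
      List.foldl_nil, List.map_cons, List.map_nil, List.sum_cons, List.sum_nil]
    have hm : PySem.Int.mod n 10 = n := by
      rw [PySem.Int.mod_eq_emod_of_pos (by norm_num : (0:Int) < 10)]
      exact Int.emod_eq_of_lt hn h
    have hd : PySem.Int.floordiv n 10 = 0 := by
      rw [PySem.Int.floordiv_eq_ediv_of_pos (by norm_num : (0:Int) < 10)]
      exact Int.ediv_eq_zero_of_lt hn h
    rw [hm, hd]
    simp [add_comm]
  | case2 n h ih =>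
    intro hn s
    have hrec : 0 ≤ PySem.Int.floordiv n 10 := by
      rw [PySem.Int.floordiv_eq_ediv_of_pos (by norm_num : (0:Int) < 10)]
      exact Int.ediv_nonneg hn (by norm_num)
    conv_lhs => rw [pyDigits]
    simp only [h, dite_false, List.length_cons]
    rw [List.range_succ_eq_map, List.foldl_cons]
    rw [List.foldl_map]
    have := ih hrec (s + (PySem.Int.mod n 10) ^ E)
    rw [show (List.range (pyDigits (PySem.Int.floordiv n 10)).length).foldl
      (fun (st : Int × Int) (_ : Nat) =>
        (PySem.Int.floordiv st.1 10, st.2 + (PySem.Int.mod st.1 10) ^ E))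
      (PySem.Int.floordiv n 10, s + (PySem.Int.mod n 10) ^ E)
      = (0, s + (PySem.Int.mod n 10) ^ E +
          (((pyDigits (PySem.Int.floordiv n 10)).map (fun d => d ^ E)).sum)) from this]
    conv_rhs => rw [pyDigits]
    simp only [h, dite_false, List.map_cons, List.sum_cons]
    ring_nf

-- the two per-element tests agree on nonnegative i
lemma cond_eq (i : Int) (hi : 0 ≤ i) :
    ((List.foldl
        (fun (st : Int × Int) (_ : Int) =>
          (PySem.Int.floordiv st.1 10,
           st.2 + PySem.Int.mod st.1 10 ^ (PySem.Str.len (PySem.Int.toStr i)).toNat))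
        (i, 0) (PySem.List.pyRange 0 (PySem.Str.len (PySem.Int.toStr i)) 1)).2 == i)
    = (((pyDigits i).map (fun d => d ^ (pyDigits i).length)).sum == i) := by
  have hexp : PySem.Str.len (PySem.Int.toStr i) = ((pyDigits i).length : Int) := by
    rw [PySem.Str.len_eq, PySem.Int.toList_toStr]
    unfold PySem.Int.toChars
    rw [if_neg (by omega)]
    rw [len_toDigits_eq_pyDigits i.toNat]
    rw [Int.toNat_of_nonneg hi]
  rw [hexp]
  have hfold : ∀ (g : Int × Int → Int × Int) (init : Int × Int) (l : List Int),
      l.foldl (fun st _ => g st) init = (List.range l.length).foldl (fun st _ => g st) init := by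
    intro g init l
    induction l generalizing init with
    | nil => simp
    | cons x xs ih =>
      simp only [List.foldl_cons, List.length_cons, List.range_succ_eq_map,
        List.foldl_cons, List.foldl_map]
      exact ih (g init)
  have hlen : (PySem.List.pyRange 0 ((pyDigits i).length : Int) 1).length
      = (pyDigits i).length := by
    rw [PySem.List.length_pyRange_one]; omega
  rw [hfold _ _ (PySem.List.pyRange 0 ((pyDigits i).length : Int) 1), hlen]
  rw [show (((pyDigits i).length : Int)).toNat = (pyDigits i).length by omega]
  rw [innerA (pyDigits i).length i hi 0]
  simp

-- for negative i, A's test is false (the accumulated sum is nonnegative)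
lemma cond_neg (i : Int) (hi : i < 0) :
    ((List.foldl
        (fun (st : Int × Int) (_ : Int) =>
          (PySem.Int.floordiv st.1 10,
           st.2 + PySem.Int.mod st.1 10 ^ (PySem.Str.len (PySem.Int.toStr i)).toNat))
        (i, 0) (PySem.List.pyRange 0 (PySem.Str.len (PySem.Int.toStr i)) 1)).2 == i)
    = false := by
  rw [beq_eq_false_iff_ne]
  intro h
  have := sumsA_nonneg (PySem.Str.len (PySem.Int.toStr i))
    (PySem.List.pyRange 0 (PySem.Str.len (PySem.Int.toStr i)) 1) (i, 0) (by simp)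
  rw [h] at this
  omega

-- main equality, total (Dom is not needed)
lemma main_eq : ∀ start end_ : Int,
    find_narcissistic_number start end_ = find_narcissistic_number_alt start end_ := by
  intro start end_
  by_cases hle : end_ ≤ start
  · unfold find_narcissistic_number find_narcissistic_number_alt
    rw [PySem.List.pyRange_one_eq_nil hle, PySem.List.pyRange_one_eq_nil (by omega)]
    rfl
  · push_neg at hle
    generalize hk : (end_ - start).toNat = k
    induction k generalizing start with
    | zero => omega
    | succ k ih =>
      by_cases hs : 0 ≤ start
      · -- both scan the same range; compare step functions pointwise
        unfold find_narcissistic_number find_narcissistic_number_alt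
        rw [max_eq_left hs]
        apply PySem.List.foldl_congr_mem
        intro acc x hx
        have hx0 : 0 ≤ x := by
          rcases (PySem.List.mem_pyRange_one).1 hx with ⟨h1, _⟩
          omega
        simp only [cond_eq x hx0]
      · -- start < 0: A's first element fails the test; B's range is unchanged
        push_neg at hs
        have hstep : find_narcissistic_number start end_
            = find_narcissistic_number (start + 1) end_ := by
          unfold find_narcissistic_number
          rw [PySem.List.pyRange_one_cons hle, List.foldl_cons]
          simp only [cond_neg start hs, Bool.false_eq_true, if_false]
        have hstepB : find_narcissistic_number_alt start end_
            = find_narcissistic_number_alt (start + 1) end_ := by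
          unfold find_narcissistic_number_alt
          rw [show max start 0 = max (start + 1) 0 by omega]
        rw [hstep, hstepB]
        by_cases hle2 : end_ ≤ start + 1
        · unfold find_narcissistic_number find_narcissistic_number_alt
          rw [PySem.List.pyRange_one_eq_nil hle2, PySem.List.pyRange_one_eq_nil (by omega)]
          rfl
        · exact ih (start + 1) (by omega) (by omega)

-- ===== VERDICT (by name: the statement is the Claim_ definition above) =====
theorem find_narcissistic_number_spec : Claim_equal_find_narcissistic_number := by
  intro start end_ _
  unfold Spec_find_narcissistic_number
  exact main_eq start end_
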